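-- pv_equiv track=rewrite | github.com/afanasevvlad829-cyber/traffic-analytics | src/run_metrica_demography_device_probe.py | _sample_values
-- ===== SOURCE A (Python) =====
-- def _sample_values(samples: list[dict[str, str]], field: str, max_values: int = 3) -> list[str]:
--     values: list[str] = []
--     for row in samples:
--         value = str(row.get(field) or "").strip()
--         if not value:
--             continue
--         if value not in values:
--             values.append(value)
--         if len(values) >= max_values:
--             break
--     return values
-- ===== SOURCE B (Python) =====
-- def _sample_values(samples: list[dict[str, str]], field: str, max_values: int = 3) -> list[str]:
--     cleaned = (str(row.get(field) or "").strip() for row in samples)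
--     distinct = list(dict.fromkeys(v for v in cleaned if v))
--     return distinct[:max(max_values, 0)]
-- ===== Notes on version B (the rewrite author's own statement) =====
-- stated objective: idiomatic
-- what changed: Replaced the incremental membership-list accumulator with an early break by a whole-sequence map/filter, ordered dedup via dict.fromkeys, and a final slice to the first max_values values.
-- intended difference: When max_values <= 0 and some row has a non-empty stripped field value, A's break test sits after the append and so returns a one-element list, while B returns distinct[:max(max_values, 0)] = [], the intended 'at most max_values values' reading. — e.g. on _sample_values([[("x", "a")]], "x", 0): A returns ["a"], B returns []
import Mathlib
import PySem

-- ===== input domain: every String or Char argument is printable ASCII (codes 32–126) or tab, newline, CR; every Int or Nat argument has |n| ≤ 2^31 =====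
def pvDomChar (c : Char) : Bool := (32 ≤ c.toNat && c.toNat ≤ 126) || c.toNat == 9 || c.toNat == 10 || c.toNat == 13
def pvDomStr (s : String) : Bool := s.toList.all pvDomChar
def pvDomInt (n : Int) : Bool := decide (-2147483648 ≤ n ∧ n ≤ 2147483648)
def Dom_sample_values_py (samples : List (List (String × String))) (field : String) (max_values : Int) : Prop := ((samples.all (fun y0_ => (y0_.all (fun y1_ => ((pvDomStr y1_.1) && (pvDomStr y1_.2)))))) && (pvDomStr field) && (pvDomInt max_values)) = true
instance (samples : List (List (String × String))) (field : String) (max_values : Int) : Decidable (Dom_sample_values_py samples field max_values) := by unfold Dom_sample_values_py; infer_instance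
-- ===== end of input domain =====

-- B replaces A's incremental membership-list accumulator with an early break by a whole-sequence
-- map/filter, ordered dedup (dict.fromkeys) and a final slice — an idiomatic data-structure rewrite.

-- ===== PORT A =====
def pvLoopA (field : String) (max_values : Int) : List (List (String × String)) → List String → List String
  | [], values => values
  | row :: rest, values =>
    let value := PySem.Str.strip ((PySem.Dict.get? ⟨row⟩ field).getD "")
    if value = "" then
      pvLoopA field max_values rest values
    else
      let values' := if value ∈ values then values else values ++ [value]
      if max_values ≤ (values'.length : Int) then values'
      else pvLoopA field max_values rest values'

def sample_values_py (samples : List (List (String × String))) (field : String) (max_values : Int) : List String :=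
  pvLoopA field max_values samples []

-- ===== PORT B =====
def sample_values_py_alt (samples : List (List (String × String))) (field : String) (max_values : Int) : List String :=
  let cleaned := samples.map (fun row => PySem.Str.strip ((PySem.Dict.get? ⟨row⟩ field).getD ""))
  let distinct := PySem.List.dedup (cleaned.filter (fun v => v ≠ ""))
  PySem.List.slice distinct none (some (max max_values 0))

-- ===== PRECONDITION & SPEC =====
-- When max_values ≤ 0 and some row has a non-empty stripped field value, A's break test (placed
-- after the append) still lets one value in and A returns that singleton, while B returns the
-- empty list distinct[:max(max_values, 0)], the intended 'at most max_values values' reading.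
def D_sample_values_py (samples : List (List (String × String))) (field : String) (max_values : Int) : Prop :=
  max_values ≤ 0 ∧
    (samples.any (fun row => ((List.lookup field row).getD "").toList.any (fun c => !(PySem.Chars.isspace c)))) = true
instance (samples : List (List (String × String))) (field : String) (max_values : Int) : Decidable (D_sample_values_py samples field max_values) := by unfold D_sample_values_py; infer_instance

def Spec_sample_values_py (samples : List (List (String × String))) (field : String) (max_values : Int) (out : List String) : Prop := ¬ D_sample_values_py samples field max_values → out = sample_values_py_alt samples field max_values
instance (samples : List (List (String × String))) (field : String) (max_values : Int) (out : List String) : Decidable (Spec_sample_values_py samples field max_values out) := by unfold Spec_sample_values_py; infer_instance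

def pvDiffWitness_sample_values_py : (List (List (String × String))) × String × Int := ([[("x", "a")]], "x", 0)
def pvDiffWitnessOut_sample_values_py : (List String) × (List String) := (["a"], [])

-- ===== CLAIM (what is proved, stated in full; the proofs are below) =====
def Claim_unchanged_sample_values_py : Prop := ∀ (samples : List (List (String × String))) (field : String) (max_values : Int), Dom_sample_values_py samples field max_values → Spec_sample_values_py samples field max_values (sample_values_py samples field max_values)
def Claim_changed_sample_values_py : Prop := Dom_sample_values_py (pvDiffWitness_sample_values_py.1) (pvDiffWitness_sample_values_py.2.1) (pvDiffWitness_sample_values_py.2.2) ∧ D_sample_values_py (pvDiffWitness_sample_values_py.1) (pvDiffWitness_sample_values_py.2.1) (pvDiffWitness_sample_values_py.2.2) ∧ sample_values_py (pvDiffWitness_sample_values_py.1) (pvDiffWitness_sample_values_py.2.1) (pvDiffWitness_sample_values_py.2.2) = pvDiffWitnessOut_sample_values_py.1 ∧ sample_values_py_alt (pvDiffWitness_sample_values_py.1) (pvDiffWitness_sample_values_py.2.1) (pvDiffWitness_sample_values_py.2.2) = pvDiffWitnessOut_sample_values_py.2 ∧ pvDiffWitnessOut_sample_values_py.1 ≠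 pvDiffWitnessOut_sample_values_py.2
def Claim_exact_sample_values_py : Prop := ∀ (samples : List (List (String × String))) (field : String) (max_values : Int), Dom_sample_values_py samples field max_values → D_sample_values_py samples field max_values → sample_values_py samples field max_values ≠ sample_values_py_alt samples field max_values

-- ===== LEMMAS AND PROOFS =====

-- the cleaned value of one row (proof-side abbreviation)
def pvClean (field : String) (row : List (String × String)) : String :=
  PySem.Str.strip ((PySem.Dict.get? ⟨row⟩ field).getD "")

-- the accumulator is always a prefix of any further Set.add fold
lemma pvPrefix_foldl_add (l : List String) : ∀ (acc : List String), acc <+: l.foldl PySem.Set.add acc := by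
  induction l with
  | nil => intro acc; exact List.prefix_refl acc
  | cons x xs ih =>
    intro acc
    refine List.IsPrefix.trans ?_ (ih (PySem.Set.add acc x))
    rw [PySem.Set.add_eq_ite]
    split
    · exact List.prefix_refl acc
    · exact ⟨[x], rfl⟩

-- A's loop with accumulator acc (shorter than max) is the full Set.add fold truncated to max
lemma pvLoopA_eq_take (field : String) (max_values : Int) :
    ∀ (samples : List (List (String × String))) (acc : List String),
      (acc.length : Int) < max_values →
      pvLoopA field max_values samples acc =
        (((samples.map (fun row => pvClean field row)).filter (fun v => v ≠ "")).foldl PySem.Set.add acc).take max_values.toNat := by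
  intro samples
  induction samples with
  | nil =>
    intro acc hlt
    simp only [pvLoopA, List.map_nil, List.filter_nil, List.foldl_nil]
    exact (List.take_of_length_le (by omega)).symm
  | cons row rest ih =>
    intro acc hlt
    simp only [pvLoopA, List.map_cons, List.filter_cons, pvClean]
    by_cases hv : PySem.Str.strip ((PySem.Dict.get? ⟨row⟩ field).getD "") = ""
    · have IH := ih acc hlt
      simp only [pvClean] at IH
      simpa [hv] using IH
    · rw [if_neg hv]
      have hkeep : (decide (¬ PySem.Str.strip ((PySem.Dict.get? ⟨row⟩ field).getD "") = "")) = true := by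
        simp [hv]
      simp only [ne_eq, hkeep, if_true, List.foldl_cons]
      by_cases hmem : PySem.Str.strip ((PySem.Dict.get? ⟨row⟩ field).getD "") ∈ acc
      · rw [if_pos hmem, PySem.Set.add_of_mem hmem]
        have hstop : ¬ max_values ≤ (acc.length : Int) := by omega
        rw [if_neg hstop]
        have IH := ih acc hlt
        simpa [pvClean] using IH
      · rw [if_neg hmem, PySem.Set.add_of_not_mem hmem]
        by_cases hstop : max_values ≤ ((acc ++ [PySem.Str.strip ((PySem.Dict.get? ⟨row⟩ field).getD "")]).length : Int)
        · rw [if_pos hstop]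
          have hlen : (acc ++ [PySem.Str.strip ((PySem.Dict.get? ⟨row⟩ field).getD "")]).length = max_values.toNat := by
            simp only [List.length_append, List.length_cons, List.length_nil] at *
            omega
          obtain ⟨u, hu⟩ := pvPrefix_foldl_add
            ((rest.map (fun row => PySem.Str.strip ((PySem.Dict.get? ⟨row⟩ field).getD ""))).filter (fun v => decide ¬v = ""))
            (acc ++ [PySem.Str.strip ((PySem.Dict.get? ⟨row⟩ field).getD "")])
          rw [← hu, ← hlen, List.take_left]
        · rw [if_neg hstop]
          have hlt' : ((acc ++ [PySem.Str.strip ((PySem.Dict.get? ⟨row⟩ field).getD "")]).length : Int) < max_values := by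
            simp only [List.length_append, List.length_cons, List.length_nil] at *
            omega
          have IH := ih (acc ++ [PySem.Str.strip ((PySem.Dict.get? ⟨row⟩ field).getD "")]) hlt'
          simpa [pvClean] using IH

-- when every cleaned value is empty, A's loop never changes the accumulator
lemma pvLoopA_all_empty (field : String) (max_values : Int) :
    ∀ (samples : List (List (String × String))) (acc : List String),
      (∀ row ∈ samples, pvClean field row = "") →
      pvLoopA field max_values samples acc = acc := by
  intro samples
  induction samples with
  | nil => intro acc _; simp [pvLoopA]
  | cons row rest ih =>
    intro acc hall
    have h0 : pvClean field row = "" := hall row (List.mem_cons_self)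
    simp only [pvClean] at h0
    simp only [pvLoopA, h0]
    exact ih acc (fun r hr => hall r (List.mem_cons_of_mem _ hr))

-- Dict.get? on an association list is Mathlib's List.lookup
lemma pvGet_eq_lookup (field : String) (row : List (String × String)) :
    PySem.Dict.get? ⟨row⟩ field = List.lookup field row := by
  induction row with
  | nil => rfl
  | cons p rest ih =>
    obtain ⟨k, v⟩ := p
    by_cases h : k = field
    · simp [PySem.Dict.get?, List.find?, List.lookup, h]
    · have h1 : (k == field) = false := by simp [h]
      have h2 : (field == k) = false := by simp [Ne.symm h]
      simp only [List.lookup, h2]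
      simpa [PySem.Dict.get?, List.find?, h1] using ih

-- a string strips to empty exactly when all its characters are whitespace
lemma pvStrip_eq_empty_iff (s : String) :
    PySem.Str.strip s = "" ↔ ∀ c ∈ s.toList, PySem.Chars.isspace c := by
  unfold PySem.Str.strip PySem.Chars.strip PySem.Chars.rstrip PySem.Chars.lstrip
  constructor
  · intro h c hc
    have hnil : (List.dropWhile PySem.Chars.isspace
        ((List.dropWhile PySem.Chars.isspace s.toList).reverse)).reverse = [] := by
      have := congrArg String.toList h
      simpa using this
    rw [List.reverse_eq_nil_iff, List.dropWhile_eq_nil_iff] at hnil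
    rcases List.mem_append.mp (by
        rw [List.takeWhile_append_dropWhile (p := PySem.Chars.isspace) (l := s.toList)]
        exact hc) with h1 | h2
    · exact List.mem_takeWhile_imp h1
    · exact hnil c (List.mem_reverse.mpr h2)
  · intro h
    have h1 : List.dropWhile PySem.Chars.isspace s.toList = [] :=
      List.dropWhile_eq_nil_iff.mpr (fun c hc => h c hc)
    simp [h1]

-- D_ restated through the ports' cleaning expression
lemma pvD_iff (samples : List (List (String × String))) (field : String) (max_values : Int) :
    D_sample_values_py samples field max_values ↔
      max_values ≤ 0 ∧ ∃ row ∈ samples, PySem.Str.strip ((PySem.Dict.get? ⟨row⟩ field).getD "") ≠ "" := by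
  unfold D_sample_values_py
  refine and_congr Iff.rfl ?_
  rw [List.any_eq_true]
  refine exists_congr fun row => and_congr Iff.rfl ?_
  rw [pvGet_eq_lookup, List.any_eq_true]
  constructor
  · rintro ⟨c, hc, hns⟩ hstrip
    have := (pvStrip_eq_empty_iff _).mp hstrip c hc
    simp [this] at hns
  · intro hstrip
    have := fun hall => hstrip ((pvStrip_eq_empty_iff _).mpr hall)
    by_contra hno
    push_neg at hno
    exact this (fun c hc => by
      have := hno c hc
      simpa using this)

-- ===== VERDICT (by name: the statement is the Claim_ definition above) =====
theorem sample_values_py_spec : Claim_unchanged_sample_values_py := by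
  intro samples field max_values _ hnD
  rw [pvD_iff] at hnD
  push_neg at hnD
  by_cases hpos : 0 < max_values
  · -- A = take max of the ordered dedup; B is the same slice
    have hA := pvLoopA_eq_take field max_values samples [] (by simpa using hpos)
    unfold sample_values_py sample_values_py_alt
    rw [hA]
    rw [PySem.List.slice_to _ (le_max_right _ _)]
    rw [max_eq_left (le_of_lt hpos)]
    simp [pvClean, PySem.List.dedup, PySem.Set.ofList, PySem.Set.empty]
  · -- max_values ≤ 0 and (since ¬D_) every cleaned value empty: both sides are []
    have hle : max_values ≤ 0 := by omega
    have hall : ∀ row ∈ samples, pvClean field row = "" := by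
      intro row hr
      have := hnD hle row hr
      simpa [pvClean] using this
    unfold sample_values_py sample_values_py_alt
    rw [pvLoopA_all_empty field max_values samples [] hall]
    have hnil : (samples.map (fun row => PySem.Str.strip ((PySem.Dict.get? ⟨row⟩ field).getD ""))).filter (fun v => !decide (v = "")) = [] := by
      rw [List.filter_eq_nil_iff]
      intro v hv
      rw [List.mem_map] at hv
      obtain ⟨row, hr, hval⟩ := hv
      have := hall row hr
      simp only [pvClean] at this
      simp [← hval, this]
    simp only [ne_eq, decide_not, hnil]
    simp [PySem.List.dedup, PySem.Set.ofList, PySem.Set.empty, PySem.List.slice,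
      PySem.List.clampIdx, List.take_nil, List.drop_nil]

theorem sample_values_py_changed : Claim_changed_sample_values_py := by
  unfold Claim_changed_sample_values_py; decide

-- with max_values ≤ 0 and a non-empty cleaned value present, A's loop returns a non-empty list
lemma pvLoopA_ne_nil (field : String) (max_values : Int) (hle : max_values ≤ 0) :
    ∀ (samples : List (List (String × String))),
      (∃ row ∈ samples, PySem.Str.strip ((PySem.Dict.get? ⟨row⟩ field).getD "") ≠ "") →
      pvLoopA field max_values samples [] ≠ [] := by
  intro samples
  induction samples with
  | nil => rintro ⟨row, hmem, _⟩; cases hmem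
  | cons row rest ih =>
    rintro ⟨r, hmem, hne⟩
    by_cases hv : PySem.Str.strip ((PySem.Dict.get? ⟨row⟩ field).getD "") = ""
    · simp only [pvLoopA, hv, if_pos rfl]
      rcases List.mem_cons.mp hmem with h | h
      · exact absurd (h ▸ hv) hne
      · exact ih ⟨r, h, hne⟩
    · simp only [pvLoopA, if_neg hv]
      have hstop : max_values ≤ (1 : Int) := by omega
      simp [hstop]

theorem sample_values_py_tight : Claim_exact_sample_values_py := by
  intro samples field max_values _ hD
  obtain ⟨hle, hex⟩ := (pvD_iff samples field max_values).mp hD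
  unfold sample_values_py sample_values_py_alt
  intro heq
  have hB : PySem.List.slice
      (PySem.List.dedup ((samples.map (fun row => PySem.Str.strip ((PySem.Dict.get? ⟨row⟩ field).getD ""))).filter (fun v => v ≠ "")))
      none (some (max max_values 0)) = [] := by
    rw [max_eq_right hle, PySem.List.slice_to _ (le_refl 0)]
    simp
  exact pvLoopA_ne_nil field max_values hle samples hex (by rw [heq]; exact hB)
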